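-- pv_equiv track=rewrite | github.com/OpenManus/OpenManus-RL | scripts/trajectory_evaluator.py | _summarize_patterns
-- ===== SOURCE A (Python) =====
-- from typing import Dict, List, Any, Tuple
--
-- def _summarize_patterns(failure_counts: Dict, trends: Dict) -> str:
--     """Generate human-readable pattern summary"""
--     top_failures = sorted(failure_counts.items(), key=lambda x: x[1], reverse=True)[:3]
--
--     summary = "Key patterns: "
--     if top_failures:
--         summary += f"Most common failure: {top_failures[0][0]} ({top_failures[0][1]} instances). "
--
--     declining_modules = [name for name, data in trends.items() if data['trend'] == 'declining']
--     if declining_modules: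
--         summary += f"Declining performance in: {', '.join(declining_modules)}. "
--
--     improving_modules = [name for name, data in trends.items() if data['trend'] == 'improving']
--     if improving_modules:
--         summary += f"Improving performance in: {', '.join(improving_modules)}."
--
--     return summary
-- ===== SOURCE B (Python) =====
-- def _summarize_patterns(failure_counts, trends) -> str:
--     """Generate human-readable pattern summary"""
--     declining = []
--     improving = []
--     for name, data in trends.items():
--         t = data['trend']
--         if t == 'declining':
--             declining.append(name)
--         elif t == 'improving':
--             improving.append(name)
--     top = max(failure_counts.items(), key=lambda kv: kv[1]) if failure_counts else None
--     return ("Key patterns: "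
--             + (f"Most common failure: {top[0]} ({top[1]} instances). " if top else "")
--             + ("Declining performance in: " + ", ".join(declining) + ". " if declining else "")
--             + ("Improving performance in: " + ", ".join(improving) + "." if improving else ""))
-- ===== Notes on version B (the rewrite author's own statement) =====
-- stated objective: alternative
-- what changed: Replaces the full reverse sort (of which only element [0] was used) by a single max scan, and fuses the two list comprehensions over trends into one loop with two accumulators; the summary is assembled as one expression instead of repeated +=.
import Mathlib
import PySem

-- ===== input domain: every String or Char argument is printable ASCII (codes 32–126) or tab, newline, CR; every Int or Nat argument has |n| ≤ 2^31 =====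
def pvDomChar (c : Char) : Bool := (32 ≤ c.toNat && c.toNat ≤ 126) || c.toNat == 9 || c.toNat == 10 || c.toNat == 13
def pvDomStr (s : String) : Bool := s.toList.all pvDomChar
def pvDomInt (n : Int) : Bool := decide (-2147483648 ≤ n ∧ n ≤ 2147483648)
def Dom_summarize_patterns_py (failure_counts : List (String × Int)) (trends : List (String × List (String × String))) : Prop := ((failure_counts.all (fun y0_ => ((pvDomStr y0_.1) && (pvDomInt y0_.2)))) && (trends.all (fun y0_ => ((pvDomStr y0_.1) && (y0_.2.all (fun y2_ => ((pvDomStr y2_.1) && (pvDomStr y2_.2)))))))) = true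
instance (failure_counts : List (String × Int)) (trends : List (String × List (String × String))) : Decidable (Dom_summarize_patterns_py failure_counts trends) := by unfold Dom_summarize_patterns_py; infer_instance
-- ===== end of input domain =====

-- B replaces A's full reverse sort (only element [0] of which is used) by a single max scan and
-- fuses the two comprehensions over trends into one loop with two accumulators (objective: alternative).

-- ===== PORT A =====
-- the 'trend' lookup is exact on Pre_ (key present); where Python raises KeyError, Pre_ excludes the input
def summarize_patterns_py (failure_counts : List (String × Int)) (trends : List (String × List (String × String))) : String :=
  let top_failures := (PySem.List.sorted failure_counts (fun x => x.2) true).take 3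
  let summary := "Key patterns: "
  let summary := match top_failures with
    | [] => summary
    | t :: _ => summary ++ ("Most common failure: " ++ t.1 ++ " (" ++ PySem.Int.toStr t.2 ++ " instances). ")
  let declining_modules := (trends.filter (fun p => PySem.Dict.getD (⟨p.2⟩ : PySem.Dict String String) "trend" "" == "declining")).map (fun p => p.1)
  let summary := if declining_modules ≠ [] then summary ++ ("Declining performance in: " ++ PySem.Str.join ", " declining_modules ++ ". ") else summary
  let improving_modules := (trends.filter (fun p => PySem.Dict.getD (⟨p.2⟩ : PySem.Dict String String) "trend" "" == "improving")).map (fun p => p.1)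
  let summary := if improving_modules ≠ [] then summary ++ ("Improving performance in: " ++ PySem.Str.join ", " improving_modules ++ ".") else summary
  summary

-- ===== PORT B =====
def summarize_patterns_py_alt (failure_counts : List (String × Int)) (trends : List (String × List (String × String))) : String :=
  let di := trends.foldl (fun (acc : List String × List String) p =>
      let t := PySem.Dict.getD (⟨p.2⟩ : PySem.Dict String String) "trend" ""
      if t == "declining" then (acc.1 ++ [p.1], acc.2)
      else if t == "improving" then (acc.1, acc.2 ++ [p.1])
      else acc) ([], [])
  let top := PySem.List.max? failure_counts (fun kv => kv.2)
  "Key patterns: "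
    ++ (match top with
        | some t => "Most common failure: " ++ t.1 ++ " (" ++ PySem.Int.toStr t.2 ++ " instances). "
        | none => "")
    ++ (if di.1 ≠ [] then "Declining performance in: " ++ PySem.Str.join ", " di.1 ++ ". " else "")
    ++ (if di.2 ≠ [] then "Improving performance in: " ++ PySem.Str.join ", " di.2 ++ "." else "")

-- ===== PRECONDITION & SPEC =====
-- Pre_ excludes exactly the inputs where Python's data['trend'] raises KeyError (a trends value without the key "trend")
def Pre_summarize_patterns_py (failure_counts : List (String × Int)) (trends : List (String × List (String × String))) : Prop :=
  ∀ p ∈ trends, PySem.Dict.contains (⟨p.2⟩ : PySem.Dict String String) "trend" = true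
instance (failure_counts : List (String × Int)) (trends : List (String × List (String × String))) : Decidable (Pre_summarize_patterns_py failure_counts trends) := by unfold Pre_summarize_patterns_py; infer_instance

def pvWitness_summarize_patterns_py : (List (String × Int)) × (List (String × List (String × String))) :=
  ([("a", 2), ("b", 2)], [("m", [("trend", "declining")]), ("n", [("trend", "improving")])])

def Spec_summarize_patterns_py (failure_counts : List (String × Int)) (trends : List (String × List (String × String))) (out : String) : Prop := out = summarize_patterns_py_alt failure_counts trends
instance (failure_counts : List (String × Int)) (trends : List (String × List (String × String))) (out : String) : Decidable (Spec_summarize_patterns_py failure_counts trends out) := by unfold Spec_summarize_patterns_py; infer_instance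

-- ===== CLAIM (what is proved, stated in full; the proofs are below) =====
def Claim_equal_summarize_patterns_py : Prop := ∀ (failure_counts : List (String × Int)) (trends : List (String × List (String × String))), Dom_summarize_patterns_py failure_counts trends → Pre_summarize_patterns_py failure_counts trends → Spec_summarize_patterns_py failure_counts trends (summarize_patterns_py failure_counts trends)

-- ===== LEMMAS AND PROOFS =====

-- B's fused loop over trends computes exactly A's two filtered name lists
theorem trends_fold_eq (l : List (String × List (String × String))) (a b : List String) :
    l.foldl (fun (acc : List String × List String) p =>
      let t := PySem.Dict.getD (⟨p.2⟩ : PySem.Dict String String) "trend" ""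
      if t == "declining" then (acc.1 ++ [p.1], acc.2)
      else if t == "improving" then (acc.1, acc.2 ++ [p.1])
      else acc) (a, b)
    = (a ++ (l.filter (fun p => PySem.Dict.getD (⟨p.2⟩ : PySem.Dict String String) "trend" "" == "declining")).map (fun p => p.1),
       b ++ (l.filter (fun p => PySem.Dict.getD (⟨p.2⟩ : PySem.Dict String String) "trend" "" == "improving")).map (fun p => p.1)) := by
  induction l generalizing a b with
  | nil => simp
  | cons p l ih =>
    simp only [beq_iff_eq] at ih ⊢
    simp only [List.foldl_cons, List.filter_cons]
    by_cases hd : PySem.Dict.getD (⟨p.2⟩ : PySem.Dict String String) "trend" "" = "declining"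
    · simp only [hd, if_pos]
      rw [ih]
      simp
    · by_cases hi : PySem.Dict.getD (⟨p.2⟩ : PySem.Dict String String) "trend" "" = "improving"
      · simp only [hi, if_pos]
        rw [ih]
        simp
      · simp only [hd, hi, if_false]
        rw [ih]
        simp [hd, hi]

-- head of one descending stable insertion equals one step of the running first-max
theorem head?_insertBy_max {α κ : Type} [LinearOrder κ] (key : α → κ) (x : α) (acc : List α) :
    (PySem.List.insertBy (fun a b => decide (key b < key a)) x acc).head?
      = some (match acc.head? with
              | none => x
              | some m => if key m < key x then x else m) := by
  cases acc with
  | nil => simp [PySem.List.insertBy]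
  | cons y ys =>
    by_cases h : key y < key x
    · simp [PySem.List.insertBy, h]
    · simp [PySem.List.insertBy, h]

-- head of the descending stable sort fold is the running first-max fold
theorem head?_foldl_insertBy {α κ : Type} [LinearOrder κ] (key : α → κ) (xs : List α) (acc : List α) :
    (xs.foldl (fun acc x => PySem.List.insertBy (fun a b => decide (key b < key a)) x acc) acc).head?
      = xs.foldl (fun o x => match o with
          | none => some x
          | some m => if key m < key x then some x else some m) acc.head? := by
  induction xs generalizing acc with
  | nil => rfl
  | cons x xs ih =>
    simp only [List.foldl_cons]
    rw [ih, head?_insertBy_max]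
    congr 1
    cases acc.head? with
    | none => rfl
    | some m => by_cases h : key m < key x <;> simp [h]

-- Python's max(xs, key) is the head of sorted(xs, key, reverse=True): both are the FIRST maximal element
theorem max?_eq_head_sorted_rev {α κ : Type} [LinearOrder κ] (xs : List α) (key : α → κ) :
    PySem.List.max? xs key = (PySem.List.sorted xs key true).head? := by
  unfold PySem.List.max? PySem.List.sorted
  simp only [if_true]
  rw [head?_foldl_insertBy]
  rfl

-- ===== VERDICT (by name: the statement is the Claim_ definition above) =====
theorem summarize_patterns_py_spec : Claim_equal_summarize_patterns_py := by
  intro failure_counts trends _ _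
  unfold Spec_summarize_patterns_py summarize_patterns_py summarize_patterns_py_alt
  rw [trends_fold_eq]
  have hmax := max?_eq_head_sorted_rev failure_counts (fun x => x.2)
  cases hs : PySem.List.sorted failure_counts (fun x => x.2) true with
  | nil =>
    rw [hs] at hmax; simp only [List.head?_nil] at hmax
    simp only [hmax, List.take_nil, List.nil_append]
    split_ifs <;> simp [String.append_assoc, String.append_empty]
  | cons t rest =>
    rw [hs] at hmax; simp only [List.head?_cons] at hmax
    simp only [hmax, List.take_succ_cons, List.nil_append]
    split_ifs <;> simp [String.append_assoc, String.append_empty]
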